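-- pv_equiv track=rewrite | github.com/AdemHodzic/python-learning | Day #35/hotelSum.py | solution
-- ===== SOURCE A (Python) =====
-- def solution(matrix):
--     temp = []
--     result = 0
--
--     for arr in matrix:
--         for i,x in enumerate(arr):
--             if x == 0:
--                 temp.append(i)
--             elif not i in temp:
--                 result += x
--     return result
-- ===== SOURCE B (Python) =====
-- def solution(matrix):
--     width = 0
--     for row in matrix:
--         if len(row) > width:
--             width = len(row)
--     total = 0
--     for c in range(width):
--         for row in matrix:
--             if c < len(row):
--                 x = row[c]
--                 if x == 0:
--                     break
--                 total += x
--     return total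
-- ===== Notes on version B (the rewrite author's own statement) =====
-- stated objective: alternative
-- what changed: Replaced the row-major scan that maintains a growing list of zero-marked column indices (linear membership test per cell) by a column-major traversal: for each column up to the max row width, sum entries row by row and break at that column's first zero; no marked-column list exists.
import Mathlib
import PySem

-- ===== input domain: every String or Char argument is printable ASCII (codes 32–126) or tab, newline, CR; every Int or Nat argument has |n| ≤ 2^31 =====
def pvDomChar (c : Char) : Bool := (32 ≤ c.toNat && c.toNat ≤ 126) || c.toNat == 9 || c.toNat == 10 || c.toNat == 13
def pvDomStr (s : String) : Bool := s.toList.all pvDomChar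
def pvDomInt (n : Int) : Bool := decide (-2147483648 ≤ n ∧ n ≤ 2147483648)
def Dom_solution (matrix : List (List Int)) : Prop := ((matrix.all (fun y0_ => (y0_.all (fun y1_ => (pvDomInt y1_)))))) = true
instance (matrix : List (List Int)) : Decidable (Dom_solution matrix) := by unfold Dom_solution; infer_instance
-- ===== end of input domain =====

-- B replaces A's row-major scan with a zero-marked-column list by a column-major scan
-- that breaks at each column's first zero (objective: alternative; same return value, no side effects).

-- ===== PORT A =====
def solution (matrix : List (List Int)) : Int :=
  (matrix.foldl (fun (st : List Int × Int) arr =>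
      (PySem.List.enumerate arr).foldl (fun (st : List Int × Int) p =>
          if p.2 = 0 then (st.1 ++ [p.1], st.2)
          else if ¬ st.1.contains p.1 then (st.1, st.2 + p.2)
          else st)
        st)
    ([], 0)).2

-- ===== PORT B =====
-- inner `for row in matrix: … break` loop of B, for one column c
def colScan (matrix : List (List Int)) (c : Nat) : Int :=
  match matrix with
  | [] => 0
  | row :: rest =>
    if h : c < row.length then
      if row[c] = 0 then 0 else row[c] + colScan rest c
    else colScan rest c

def solution_alt (matrix : List (List Int)) : Int :=
  let width := matrix.foldl (fun w row => if row.length > w then row.length else w) 0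
  (List.range width).foldl (fun total c => total + colScan matrix c) 0

-- ===== PRECONDITION & SPEC =====
def Spec_solution (matrix : List (List Int)) (out : Int) : Prop := out = solution_alt matrix
instance (matrix : List (List Int)) (out : Int) : Decidable (Spec_solution matrix out) := by unfold Spec_solution; infer_instance

-- ===== CLAIM (what is proved, stated in full; the proofs are below) =====
def Claim_equal_solution : Prop := ∀ (matrix : List (List Int)), Dom_solution matrix → Spec_solution matrix (solution matrix)

-- ===== LEMMAS AND PROOFS =====

-- zero indices of a row, offset by k (what A appends to temp while scanning the row)
def zf (k : Int) : List Int → List Int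
  | [] => []
  | x :: xs => if x = 0 then k :: zf (k + 1) xs else zf (k + 1) xs

-- A's contribution of one row, against a FIXED blocked set t (valid because indices
-- appended during the row are strictly smaller than the indices tested after them)
def rs (k : Int) (t : List Int) : List Int → Int
  | [] => 0
  | x :: xs => (if x = 0 then 0 else if t.contains k then 0 else x) + rs (k + 1) t xs

theorem rs_append_lt (xs : List Int) (k : Int) (t : List Int) (m : Int) (hm : m < k) :
    rs k (t ++ [m]) xs = rs k t xs := by
  induction xs generalizing k with
  | nil => simp [rs]
  | cons x xs ih =>
    simp only [rs]
    rw [ih (k + 1) (by omega)]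
    have hne : k ≠ m := by omega
    simp [hne]

theorem inner_fold (arr : List Int) (k : Int) (t : List Int) (s : Int) :
    (PySem.List.enumerate arr k).foldl
        (fun (st : List Int × Int) p =>
          if p.2 = 0 then (st.1 ++ [p.1], st.2)
          else if ¬ st.1.contains p.1 then (st.1, st.2 + p.2)
          else st)
        (t, s)
      = (t ++ zf k arr, s + rs k t arr) := by
  induction arr generalizing k t s with
  | nil => simp [PySem.List.enumerate_nil, zf, rs]
  | cons x xs ih =>
    rw [PySem.List.enumerate_cons, List.foldl_cons]
    rw [show (if ((k, x).2 : Int) = 0 then (((t, s).1 : List Int) ++ [(k, x).1], (t, s).2)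
        else if ¬ (t, s).1.contains (k, x).1 then ((t, s).1, (t, s).2 + (k, x).2) else (t, s))
        = if x = 0 then (t ++ [k], s) else if ¬ t.contains k then (t, s + x) else (t, s) from rfl]
    by_cases hx : x = 0
    · rw [if_pos hx, ih]
      subst hx
      rw [rs_append_lt xs (k + 1) t k (by omega)]
      simp [zf, rs, List.append_assoc]
    · rw [if_neg hx]
      by_cases hc : t.contains k
      · rw [if_neg (by simpa using hc), ih]
        have hk : k ∈ t := by simpa using hc
        simp [zf, rs, hx, hk]
      · rw [if_pos (by simpa using hc), ih]
        have hk : k ∉ t := by simpa using hc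
        simp [zf, rs, hx, hk]
        ring

-- value A adds for cell (row, c) given blocked set t
def rv (t : List Int) (row : List Int) (c : Nat) : Int :=
  if h : c < row.length then
    (if row[c] = 0 then 0 else if t.contains (c : Int) then 0 else row[c])
  else 0

def rvk (k : Int) (t : List Int) (row : List Int) (c : Nat) : Int :=
  if h : c < row.length then
    (if row[c] = 0 then 0 else if t.contains (k + (c : Int)) then 0 else row[c])
  else 0

theorem rs_eq_sum (row : List Int) (k : Int) (t : List Int) :
    rs k t row = ∑ c ∈ Finset.range row.length, rvk k t row c := by
  induction row generalizing k with
  | nil => simp [rs]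
  | cons x xs ih =>
    rw [List.length_cons, Finset.sum_range_succ']
    have h0 : rvk k t (x :: xs) 0 = (if x = 0 then 0 else if t.contains k then 0 else x) := by
      simp [rvk]
    have hsh : ∀ c ∈ Finset.range xs.length, rvk k t (x :: xs) (c + 1) = rvk (k + 1) t xs c := by
      intro c hc
      simp only [Finset.mem_range] at hc
      have he : k + ((c : Int) + 1) = (k + 1) + (c : Int) := by ring
      simp [rvk, hc, he]
    have hs : ∑ c ∈ Finset.range xs.length, rvk k t (x :: xs) (c + 1)
        = ∑ c ∈ Finset.range xs.length, rvk (k + 1) t xs c := Finset.sum_congr rfl hsh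
    rw [hs]
    rw [h0]
    simp only [rs]
    rw [ih]
    ring

theorem rs_eq_sum_W (row : List Int) (t : List Int) (W : Nat) (hW : row.length ≤ W) :
    rs 0 t row = ∑ c ∈ Finset.range W, rv t row c := by
  have h1 : rs 0 t row = ∑ c ∈ Finset.range row.length, rv t row c := by
    rw [rs_eq_sum]
    exact Finset.sum_congr rfl fun c hc => by simp [rvk, rv]
  rw [h1]
  exact Finset.sum_subset
    (by intro x hx; simp only [Finset.mem_range] at *; omega)
    (by intro c _ hc; simp only [Finset.mem_range, not_lt] at hc; simp [rv, Nat.not_lt.mpr hc])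

theorem zf_mem (row : List Int) (k j : Int) :
    j ∈ zf k row ↔ ∃ c : Nat, c < row.length ∧ j = k + (c : Int) ∧ row.getD c 1 = 0 := by
  induction row generalizing k with
  | nil => simp [zf]
  | cons x xs ih =>
    constructor
    · intro hj
      by_cases hx : x = 0
      · rw [zf, if_pos hx] at hj
        rcases List.mem_cons.mp hj with rfl | hj'
        · exact ⟨0, by simp, by simp, by simp [hx]⟩
        · rcases (ih (k + 1)).mp hj' with ⟨c, hc, rfl, hz⟩
          exact ⟨c + 1, by simp; omega, by push_cast; ring, by simpa using hz⟩
      · rw [zf, if_neg hx] at hj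
        rcases (ih (k + 1)).mp hj with ⟨c, hc, rfl, hz⟩
        exact ⟨c + 1, by simp; omega, by push_cast; ring, by simpa using hz⟩
    · rintro ⟨c, hc, rfl, hz⟩
      cases c with
      | zero =>
        simp only [List.getD_cons_zero] at hz
        subst hz
        simp [zf]
      | succ c =>
        have hcc : c < xs.length := by simp at hc; omega
        have hzz : xs.getD c 1 = 0 := by simpa using hz
        have hm : k + ((c + 1 : Nat) : Int) ∈ zf (k + 1) xs :=
          (ih (k + 1)).mpr ⟨c, hcc, by push_cast; ring, hzz⟩
        by_cases hx : x = 0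
        · rw [zf, if_pos hx]; exact List.mem_cons_of_mem _ hm
        · rw [zf, if_neg hx]; exact hm

theorem step_pointwise (t : List Int) (row : List Int) (rest : List (List Int)) (c : Nat) :
    rv t row c + (if (t ++ zf 0 row).contains (c : Int) then 0 else colScan rest c)
      = if t.contains (c : Int) then 0 else colScan (row :: rest) c := by
  by_cases ht : (c : Int) ∈ t
  · simp [rv, ht]
  · by_cases hlen : c < row.length
    · by_cases hz : row[c] = 0
      · have hmem : (c : Int) ∈ zf 0 row := by
          rw [zf_mem]
          exact ⟨c, hlen, by simp, by simp [List.getElem?_eq_getElem hlen, hz]⟩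
        simp [rv, ht, hmem, hlen, hz, colScan]
      · have hnm : (c : Int) ∉ zf 0 row := by
          rw [zf_mem]
          rintro ⟨c', hc', hce, hz'⟩
          have hcc : c' = c := by exact_mod_cast (by omega : (c' : Int) = (c : Int))
          subst hcc
          rw [List.getD_eq_getElem _ _ hc'] at hz'
          exact hz hz'
        simp [rv, ht, hnm, hlen, hz, colScan]
    · have hnm : (c : Int) ∉ zf 0 row := by
        rw [zf_mem]
        rintro ⟨c', hc', hce, _⟩
        have hcc : c' = c := by exact_mod_cast (by omega : (c' : Int) = (c : Int))
        omega
      simp [rv, ht, hnm, hlen, colScan]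

theorem main_fold (rows : List (List Int)) (t : List Int) (s : Int) (W : Nat)
    (hW : ∀ row ∈ rows, row.length ≤ W) :
    (rows.foldl (fun (st : List Int × Int) arr =>
        (PySem.List.enumerate arr).foldl (fun (st : List Int × Int) p =>
            if p.2 = 0 then (st.1 ++ [p.1], st.2)
            else if ¬ st.1.contains p.1 then (st.1, st.2 + p.2)
            else st)
          st)
      (t, s)).2
      = s + ∑ c ∈ Finset.range W, (if t.contains (c : Int) then 0 else colScan rows c) := by
  induction rows generalizing t s with
  | nil => simp [colScan]
  | cons row rest ih =>
    rw [List.foldl_cons, inner_fold,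
        ih (t ++ zf 0 row) (s + rs 0 t row) (fun r hr => hW r (List.mem_cons_of_mem _ hr)),
        rs_eq_sum_W row t W (hW row (List.mem_cons_self ..)),
        add_assoc, ← Finset.sum_add_distrib]
    congr 1
    exact Finset.sum_congr rfl fun c _ => step_pointwise t row rest c

theorem width_ge (rows : List (List Int)) (acc : Nat) :
    acc ≤ rows.foldl (fun w row => if row.length > w then row.length else w) acc ∧
    ∀ row ∈ rows, row.length ≤ rows.foldl (fun w row => if row.length > w then row.length else w) acc := by
  induction rows generalizing acc with
  | nil => simp
  | cons row rest ih =>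
    simp only [List.foldl_cons]
    set a' := if row.length > acc then row.length else acc with ha'
    have hacc : acc ≤ a' := by rw [ha']; split <;> omega
    have hrow : row.length ≤ a' := by rw [ha']; split <;> omega
    have h1 := ih a'
    refine ⟨le_trans hacc h1.1, ?_⟩
    intro r hr
    rcases List.mem_cons.mp hr with rfl | hr
    · exact le_trans hrow h1.1
    · exact h1.2 r hr

theorem range_foldl_sum (f : Nat → Int) (n : Nat) (s : Int) :
    (List.range n).foldl (fun total c => total + f c) s = s + ∑ c ∈ Finset.range n, f c := by
  induction n generalizing s with
  | zero => simp
  | succ n ih => rw [List.range_succ, List.foldl_append, ih, Finset.sum_range_succ]; simp; ring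

-- ===== VERDICT (by name: the statement is the Claim_ definition above) =====
theorem solution_spec : Claim_equal_solution := by
  intro matrix _
  unfold Spec_solution solution solution_alt
  set W := matrix.foldl (fun w row => if row.length > w then row.length else w) 0 with hWdef
  rw [main_fold matrix [] 0 W (width_ge matrix 0).2, range_foldl_sum]
  simp
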